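-- pv_equiv track=rewrite | github.com/Nahid-Akhtar/Pattern-Recognition | Pattern_Detection.py | create_common_letters
-- ===== SOURCE A (Python) =====
-- def create_common_letters(similar_items):
--     min_length = min(len(x) for x in similar_items)
--     common_letters_format = []
--     for i in range(min_length):
--         check_count = 0
--         for k, v in enumerate(similar_items[1:]):
--             if v[i] == similar_items[0][i]:
--                 check_count = check_count + 1
--         if check_count == (len(similar_items)-1):
--             common_letters_format.append('*')
--         else:
--             common_letters_format.append('-')
--     return common_letters_format
-- ===== SOURCE B (Python) =====
-- def create_common_letters(similar_items):
--     first = similar_items[0]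
--     mask = [True] * min(len(x) for x in similar_items)
--     for s in similar_items[1:]:
--         mask = [m and a == b for m, a, b in zip(mask, s, first)]
--     return ['*' if m else '-' for m in mask]
-- ===== Notes on version B (the rewrite author's own statement) =====
-- stated objective: alternative
-- what changed: A scans column-major (for each position, an inner loop counting how many of the other strings match the first); B scans row-major, folding over the strings while maintaining a boolean match-mask that each string ANDs into, and renders the mask at the end.
import Mathlib
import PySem

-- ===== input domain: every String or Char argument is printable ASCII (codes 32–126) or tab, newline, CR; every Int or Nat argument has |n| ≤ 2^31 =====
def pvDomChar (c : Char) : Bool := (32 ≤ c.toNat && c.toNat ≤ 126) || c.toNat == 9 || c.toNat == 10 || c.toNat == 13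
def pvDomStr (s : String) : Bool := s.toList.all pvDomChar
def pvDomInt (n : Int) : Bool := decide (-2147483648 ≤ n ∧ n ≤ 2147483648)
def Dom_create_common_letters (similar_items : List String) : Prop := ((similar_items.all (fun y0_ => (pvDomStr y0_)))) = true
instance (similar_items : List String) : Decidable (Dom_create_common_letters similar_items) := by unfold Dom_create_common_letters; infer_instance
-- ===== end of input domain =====

-- B replaces A's column-major counting scan by a row-major fold over the strings that
-- maintains a boolean match-mask (alternative decomposition, same cost).

-- ===== PORT A =====
-- literal transliteration of A: min over the lengths, then for each i an inner
-- enumerate-loop over similar_items[1:] counting the strings whose i-th char equals the first string's.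
def create_common_letters (similar_items : List String) : List String :=
  match PySem.List.min? (similar_items.map (fun x => PySem.Str.len x)) (fun y => y) with
  | none => []   -- Python: min() raises ValueError here; excluded by Pre_
  | some min_length =>
    (PySem.List.pyRange 0 min_length 1).foldl (fun acc i =>
      let check_count : Int :=
        (PySem.List.enumerate (PySem.List.slice similar_items (some 1) none) 0).foldl
          (fun cc kv =>
            if PySem.Str.pyGet? kv.2 i = PySem.Str.pyGet? (PySem.List.pyGetD similar_items 0 "") i
            then cc + 1 else cc) 0
      if check_count = PySem.List.len similar_items - 1 then acc ++ ["*"] else acc ++ ["-"]) []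

-- ===== PORT B =====
-- one loop body of B: [m and a == b for m, a, b in zip(mask, s, first)]
-- (Python's triple zip truncates to the shortest of the three lists, as List.zip does).
def pvMaskStep (first : List Char) (mask : List Bool) (s : List Char) : List Bool :=
  (mask.zip (s.zip first)).map (fun p => p.1 && decide (p.2.1 = p.2.2))

def create_common_letters_alt (similar_items : List String) : List String :=
  match similar_items with
  | [] => []   -- Python: similar_items[0] raises IndexError; excluded by Pre_
  | s0 :: rest =>
    match PySem.List.min? ((s0 :: rest).map (fun x => PySem.Str.len x)) (fun y => y) with
    | none => []   -- unreachable: the list is nonempty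
    | some n =>
      -- n is a length, hence nonnegative: toNat is exact
      let mask0 := List.replicate n.toNat true
      let mask := rest.foldl (fun mask s => pvMaskStep s0.toList mask s.toList) mask0
      mask.map (fun m => if m then "*" else "-")

-- ===== PRECONDITION & SPEC =====
-- On the empty list A raises ValueError (min() of an empty sequence) and B raises IndexError
-- (similar_items[0]); Pre_ excludes exactly that input.
def Pre_create_common_letters (similar_items : List String) : Prop := similar_items ≠ []
instance (similar_items : List String) : Decidable (Pre_create_common_letters similar_items) := by unfold Pre_create_common_letters; infer_instance
def pvWitness_create_common_letters : List String := ["abc", "abd"]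

def Spec_create_common_letters (similar_items : List String) (out : List String) : Prop := out = create_common_letters_alt similar_items
instance (similar_items : List String) (out : List String) : Decidable (Spec_create_common_letters similar_items out) := by unfold Spec_create_common_letters; infer_instance

-- ===== CLAIM (what is proved, stated in full; the proofs are below) =====
def Claim_equal_create_common_letters : Prop := ∀ (similar_items : List String), Dom_create_common_letters similar_items → Pre_create_common_letters similar_items → Spec_create_common_letters similar_items (create_common_letters similar_items)

-- ===== LEMMAS AND PROOFS =====

-- the minimum of a nonempty list of naturals, as min() computes it
def pvMin : List Nat → Nat
  | [] => 0
  | x :: t => t.foldl min x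

theorem pvFoldlMin_le_init (t : List Nat) (x : Nat) : t.foldl min x ≤ x := by
  induction t generalizing x with
  | nil => simp
  | cons b t ih => exact le_trans (ih (min x b)) (by omega)

theorem pvFoldlMin_le_mem {t : List Nat} {a : Nat} (x : Nat) (h : a ∈ t) : t.foldl min x ≤ a := by
  induction t generalizing x with
  | nil => cases h
  | cons b t ih =>
    rcases List.mem_cons.1 h with rfl | h
    · exact le_trans (pvFoldlMin_le_init t (min x a)) (by omega)
    · exact ih _ h

theorem pvMin_le {ns : List Nat} {a : Nat} (h : a ∈ ns) : pvMin ns ≤ a := by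
  cases ns with
  | nil => cases h
  | cons x t =>
    rcases List.mem_cons.1 h with rfl | h
    · exact pvFoldlMin_le_init t a
    · exact pvFoldlMin_le_mem x h

theorem pvEnumFoldl (xs : List String) (s : Int) (f : Int → String → Int) (a : Int) :
    (PySem.List.enumerate xs s).foldl (fun cc kv => f cc kv.2) a = xs.foldl f a := by
  induction xs generalizing s a with
  | nil => simp [PySem.List.enumerate]
  | cons x xs ih => rw [PySem.List.enumerate_cons]; simp only [List.foldl_cons]; exact ih _ _

theorem pvFoldlCount (p : String → Prop) [DecidablePred p] (xs : List String) (a : Int) :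
    xs.foldl (fun cc v => if p v then cc + 1 else cc) a
      = a + (xs.countP (fun v => decide (p v)) : Int) := by
  induction xs generalizing a with
  | nil => simp
  | cons x xs ih =>
    simp only [List.foldl_cons, List.countP_cons]
    by_cases h : p x <;> (simp only [h, if_pos, decide_eq_true_eq]; rw [ih]; simp) <;> ring

theorem pvLenFoldlMin (t : List String) (s0 : String) :
    (t.map (fun x => PySem.Str.len x)).foldl min (PySem.Str.len s0)
      = ((t.map (fun s => s.toList.length)).foldl min s0.toList.length : Nat) := by
  induction t generalizing s0 with
  | nil => simp [PySem.Str.len_eq]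
  | cons b t ih =>
    simp only [List.map_cons, List.foldl_cons]
    have h1 : min (PySem.Str.len s0) (PySem.Str.len b)
        = PySem.Str.len (if s0.toList.length ≤ b.toList.length then s0 else b) := by
      split <;> simp only [PySem.Str.len_eq] <;> omega
    rw [h1, ih]
    have h2 : (if s0.toList.length ≤ b.toList.length then s0 else b).toList.length
        = min s0.toList.length b.toList.length := by
      split <;> omega
    rw [h2]

-- the entry A produces for column i
def pvEntry (s0 : String) (rest : List String) (i : Int) : String :=
  if ((rest.countP (fun v => decide (PySem.Str.pyGet? v i = PySem.Str.pyGet? s0 i)) : Int)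
      = (rest.length : Int)) then "*" else "-"

-- one mask step, applied to a mask written as a map over range n
theorem pvMaskStep_range (first s : List Char) (n : Nat) (f : Nat → Bool)
    (hf : n ≤ first.length) (hs : n ≤ s.length) :
    pvMaskStep first ((List.range n).map f) s
      = (List.range n).map (fun i => f i && decide (s.getD i default = first.getD i default)) := by
  unfold pvMaskStep
  apply List.ext_getElem
  · simp; omega
  · intro i h1 h2
    have hi : i < n := by simpa using h2
    have hif : i < first.length := lt_of_lt_of_le hi hf
    have his : i < s.length := lt_of_lt_of_le hi hs
    simp [List.getElem_zip, List.getD, List.getElem?_eq_getElem his, List.getElem?_eq_getElem hif]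

-- the whole fold: the mask at position i records whether every processed string matches first there
theorem pvMaskFold_range (first : List Char) (n : Nat) (hf : n ≤ first.length)
    (rest : List String) (hr : ∀ v ∈ rest, n ≤ v.toList.length) (f : Nat → Bool) :
    rest.foldl (fun mask s => pvMaskStep first mask s.toList) ((List.range n).map f)
      = (List.range n).map (fun i =>
          f i && rest.all (fun v => decide (v.toList.getD i default = first.getD i default))) := by
  induction rest generalizing f with
  | nil => simp
  | cons v t ih =>
    simp only [List.foldl_cons]
    rw [pvMaskStep_range first v.toList n f hf (hr v (by simp))]
    rw [ih (fun u hu => hr u (by simp [hu]))]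
    refine List.map_congr_left (fun i _ => ?_)
    simp [Bool.and_assoc]

theorem create_common_letters_spec : Claim_equal_create_common_letters := by
  intro similar_items _ hpre
  unfold Spec_create_common_letters
  cases similar_items with
  | nil => exact absurd rfl hpre
  | cons s0 rest =>
    set m : Nat := pvMin (((s0 :: rest).map String.toList).map List.length) with hmdef
    have hm_le : ∀ l ∈ (s0 :: rest).map String.toList, m ≤ l.length := fun l hl =>
      pvMin_le (List.mem_map.2 ⟨l, hl, rfl⟩)
    have hmin : PySem.List.min? ((s0 :: rest).map (fun x => PySem.Str.len x)) (fun y => y)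
        = some (m : Int) := by
      rw [List.map_cons, PySem.List.min?_id_cons, pvLenFoldlMin]
      congr 1
      simp [hmdef, pvMin, List.map_map, Function.comp_def]
    -- A side
    rw [create_common_letters, hmin]
    show (PySem.List.pyRange 0 (m : Int) 1).foldl _ [] = _
    have hrange : PySem.List.pyRange 0 (m : Int) 1
        = (List.range m).map (fun k : Nat => (k : Int)) := PySem.List.pyRange_zero_natCast m
    rw [hrange, List.foldl_map]
    have hbody : ∀ (acc : List String) (i : Int),
        (let check_count : Int :=
          (PySem.List.enumerate (PySem.List.slice (s0 :: rest) (some 1) none) 0).foldl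
            (fun cc kv =>
              if PySem.Str.pyGet? kv.2 i = PySem.Str.pyGet? (PySem.List.pyGetD (s0 :: rest) 0 "") i
              then cc + 1 else cc) 0
        if check_count = PySem.List.len (s0 :: rest) - 1 then acc ++ ["*"] else acc ++ ["-"])
        = acc ++ [pvEntry s0 rest i] := by
      intro acc i
      simp only [PySem.List.slice_from_one, List.tail_cons, PySem.List.pyGetD_zero_cons]
      rw [pvEnumFoldl rest 0
        (fun cc v => if PySem.Str.pyGet? v i = PySem.Str.pyGet? s0 i then cc + 1 else cc) 0,
        pvFoldlCount]
      simp only [PySem.List.len, List.length_cons, pvEntry, zero_add]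
      split_ifs with h1 h2
      · rfl
      · exfalso; push_cast at h1 h2; omega
      · rename_i h2; exfalso; push_cast at h1 h2; omega
      · rfl
    refine Eq.trans (List.foldl_ext _
      (fun (acc : List String) (k : Nat) => acc ++ [pvEntry s0 rest (k : Int)]) _
      (fun acc k _ => hbody acc (k : Int))) ?_
    rw [PySem.List.foldl_append_singleton_eq_map, List.nil_append]
    -- B side
    rw [create_common_letters_alt]
    rw [hmin]
    simp only [Int.toNat_natCast]
    have hrepl : List.replicate m true = (List.range m).map (fun _ => true) := by
      simp [List.map_const']
    rw [hrepl, pvMaskFold_range s0.toList m (hm_le _ (by simp))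
      rest (fun v hv => hm_le v.toList (by simp [List.mem_map]; exact Or.inr ⟨v, hv, rfl⟩)) _]
    rw [List.map_map]
    refine List.map_congr_left (fun i hi => ?_)
    have him : i < m := List.mem_range.1 hi
    have hgets0 : PySem.Str.pyGet? s0 (i : Int) = some (s0.toList.getD i default) := by
      have hl : i < s0.toList.length := lt_of_lt_of_le him (hm_le _ (by simp))
      rw [PySem.Str.pyGet?_natCast, List.getElem?_eq_getElem hl, List.getD_eq_getElem _ _ hl]
    have hcount : ((rest.countP (fun v =>
          decide (PySem.Str.pyGet? v (i : Int) = PySem.Str.pyGet? s0 (i : Int))) : Int)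
          = (rest.length : Int))
        ↔ (∀ v ∈ rest, v.toList.getD i default = s0.toList.getD i default) := by
      rw [Int.natCast_inj, List.countP_eq_length]
      refine forall₂_congr (fun v hv => ?_)
      have hlv : i < v.toList.length := by
        refine lt_of_lt_of_le him (hm_le _ ?_)
        simp only [List.map_cons, List.mem_cons]
        exact Or.inr (List.mem_map.2 ⟨v, hv, rfl⟩)
      rw [decide_eq_true_eq, PySem.Str.pyGet?_natCast, List.getElem?_eq_getElem hlv, hgets0,
        List.getD_eq_getElem _ _ hlv]
      simp
    have hall : ((rest.all (fun v =>
          decide (v.toList.getD i default = s0.toList.getD i default))) = true)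
        ↔ (∀ v ∈ rest, v.toList.getD i default = s0.toList.getD i default) := by
      simp [List.all_eq_true]
    rw [Function.comp_apply, pvEntry]
    simp only [Bool.true_and]
    by_cases hc : ∀ v ∈ rest, v.toList.getD i default = s0.toList.getD i default
    · rw [if_pos (hcount.2 hc), if_pos (hall.2 hc)]
    · rw [if_neg (fun h => hc (hcount.1 h)), if_neg (fun h => hc (hall.1 h))]
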